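-- pv_equiv track=rewrite | github.com/umakiyer/HackerRank-Challenge | mutation.py | solution
-- ===== SOURCE A (Python) =====
-- def solution(n, a):
--     b=[0]*n
--     for i in range(n):
--         if i == 0:
--             b[i]=a[i]+a[i+1]
--         elif i==n-1:
--
--             b[i]=a[i-1]+a[i]
--         else :
--
--             b[i]=a[i-1]+a[i]+a[i+1]
--
--     return b
-- ===== SOURCE B (Python) =====
-- def solution(n, a):
--     # prefix sums: b[i] is the sum of the window a[max(i-1,0) : min(i+2, n)]
--     s = [0]
--     for x in a:
--         s.append(s[-1] + x)
--     return [s[min(i + 2, n)] - s[max(i - 1, 0)] for i in range(n)]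
-- ===== Notes on version B (the rewrite author's own statement) =====
-- stated objective: alternative
-- what changed: Replaced the three-branch in-place update loop over a preallocated [0]*n list by a prefix-sum array plus a closed-form window comprehension b[i] = S[min(i+2,n)] - S[max(i-1,0)] with no branches.
-- intended difference: For n == 1 (with len(a) >= 2) A returns [a[0]+a[1]], reading a neighbor outside the n-element window, while B returns [a[0]], the sum of the single-element window, which is the intended value. — e.g. on solution(1, [5, 7]): A returns [12], B returns [5]
import Mathlib
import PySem

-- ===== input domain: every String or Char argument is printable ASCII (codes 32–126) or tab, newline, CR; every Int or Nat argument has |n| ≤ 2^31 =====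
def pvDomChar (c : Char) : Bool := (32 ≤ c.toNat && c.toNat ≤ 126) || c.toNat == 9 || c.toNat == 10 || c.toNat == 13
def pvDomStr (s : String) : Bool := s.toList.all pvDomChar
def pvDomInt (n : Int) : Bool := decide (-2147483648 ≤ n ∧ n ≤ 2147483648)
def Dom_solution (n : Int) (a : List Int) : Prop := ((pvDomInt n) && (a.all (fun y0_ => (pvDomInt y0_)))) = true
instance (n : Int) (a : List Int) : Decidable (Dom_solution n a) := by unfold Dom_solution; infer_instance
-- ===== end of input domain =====

-- B replaces A's three-branch in-place update loop by a prefix-sum array and a branch-free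
-- window formula (alternative decomposition, same O(n) cost); for n == 1 A reads a neighbor
-- outside the window (D_ below) and B returns the intended single-element window sum.


-- ===== PORT A =====
def solution (n : Int) (a : List Int) : List Int :=
  let b := List.replicate n.toNat 0
  (PySem.List.pyRange 0 n 1).foldl (fun b i =>
    if i == 0 then
      PySem.List.pySetD b i (PySem.List.pyGetD a i 0 + PySem.List.pyGetD a (i + 1) 0)
    else if i == n - 1 then
      PySem.List.pySetD b i (PySem.List.pyGetD a (i - 1) 0 + PySem.List.pyGetD a i 0)
    else
      PySem.List.pySetD b i
        (PySem.List.pyGetD a (i - 1) 0 + PySem.List.pyGetD a i 0 + PySem.List.pyGetD a (i + 1) 0)) b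

-- ===== PORT B =====
def solution_alt (n : Int) (a : List Int) : List Int :=
  let s := a.foldl (fun s x => s ++ [PySem.List.pyGetD s (-1) 0 + x]) [0]
  (PySem.List.pyRange 0 n 1).map (fun i =>
    PySem.List.pyGetD s (min (i + 2) n) 0 - PySem.List.pyGetD s (max (i - 1) 0) 0)

-- ===== PRECONDITION & SPEC =====
-- Pre_ excludes exactly the inputs on which A raises IndexError: n ≥ 1 with len(a) < max(2, n).
def Pre_solution (n : Int) (a : List Int) : Prop :=
  n ≤ 0 ∨ (1 ≤ n ∧ 2 ≤ a.length ∧ n ≤ (a.length : Int))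
instance (n : Int) (a : List Int) : Decidable (Pre_solution n a) := by
  unfold Pre_solution; infer_instance
def pvWitness_solution : Int × List Int := (3, [1, 2, 3])

-- For n = 1 (with len(a) ≥ 2 and a[1] ≠ 0) A returns [a[0]+a[1]], reading a neighbor outside the
-- n-element window, while B returns [a[0]], the sum of the single-element window — the intended value.
def D_solution (n : Int) (a : List Int) : Prop := n = 1 ∧ a.getD 1 0 ≠ 0
instance (n : Int) (a : List Int) : Decidable (D_solution n a) := by
  unfold D_solution; infer_instance

def Spec_solution (n : Int) (a : List Int) (out : List Int) : Prop :=
  ¬ D_solution n a → out = solution_alt n a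
instance (n : Int) (a : List Int) (out : List Int) : Decidable (Spec_solution n a out) := by
  unfold Spec_solution; infer_instance

def pvDiffWitness_solution : Int × List Int := (1, [5, 7])
def pvDiffWitnessOut_solution : (List Int) × (List Int) := ([12], [5])

-- ===== CLAIM (what is proved, stated in full; the proofs are below) =====
def Claim_unchanged_solution : Prop := ∀ (n : Int) (a : List Int),
  Dom_solution n a → Pre_solution n a → Spec_solution n a (solution n a)
def Claim_changed_solution : Prop :=
  Dom_solution (pvDiffWitness_solution.1) (pvDiffWitness_solution.2) ∧
  Pre_solution (pvDiffWitness_solution.1) (pvDiffWitness_solution.2) ∧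
  D_solution (pvDiffWitness_solution.1) (pvDiffWitness_solution.2) ∧
  solution (pvDiffWitness_solution.1) (pvDiffWitness_solution.2) = pvDiffWitnessOut_solution.1 ∧
  solution_alt (pvDiffWitness_solution.1) (pvDiffWitness_solution.2) = pvDiffWitnessOut_solution.2 ∧
  pvDiffWitnessOut_solution.1 ≠ pvDiffWitnessOut_solution.2
def Claim_exact_solution : Prop := ∀ (n : Int) (a : List Int),
  Dom_solution n a → Pre_solution n a → D_solution n a → solution n a ≠ solution_alt n a
-- ===== LEMMAS AND PROOFS =====

-- The window value A writes at index i.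
def winA (n : Int) (a : List Int) (i : Int) : Int :=
  if i == 0 then PySem.List.pyGetD a i 0 + PySem.List.pyGetD a (i + 1) 0
  else if i == n - 1 then PySem.List.pyGetD a (i - 1) 0 + PySem.List.pyGetD a i 0
  else PySem.List.pyGetD a (i - 1) 0 + PySem.List.pyGetD a i 0 + PySem.List.pyGetD a (i + 1) 0

lemma solution_step_eq (n : Int) (a : List Int) (b : List Int) (i : Int) :
    (if i == 0 then
      PySem.List.pySetD b i (PySem.List.pyGetD a i 0 + PySem.List.pyGetD a (i + 1) 0)
    else if i == n - 1 then
      PySem.List.pySetD b i (PySem.List.pyGetD a (i - 1) 0 + PySem.List.pyGetD a i 0)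
    else
      PySem.List.pySetD b i
        (PySem.List.pyGetD a (i - 1) 0 + PySem.List.pyGetD a i 0 + PySem.List.pyGetD a (i + 1) 0))
    = PySem.List.pySetD b i (winA n a i) := by
  unfold winA; split_ifs <;> rfl

lemma take_set_aux (b : List Int) (i : Nat) (v : Int) (h : i < b.length) :
    (b.set i v).take (i + 1) = b.take i ++ [v] := by
  rw [List.set_eq_take_append_cons_drop, if_pos h, List.take_append]
  simp [List.length_take, Nat.min_eq_left (le_of_lt h)]

lemma drop_set_aux (b : List Int) (i j : Nat) (v : Int) (h : i < b.length) (hij : i < j) :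
    (b.set i v).drop j = b.drop j := by
  rw [List.set_eq_take_append_cons_drop, if_pos h, List.drop_append]
  simp only [List.length_take, Nat.min_eq_left (le_of_lt h)]
  have h2 : j - i = (j - i - 1) + 1 := by omega
  rw [List.drop_eq_nil_of_le (by simp [List.length_take]; omega), h2, List.drop_succ_cons,
    List.drop_drop]
  simp; omega

-- An update loop over range(lo, hi) writes w i at each position i.
lemma foldl_pySetD_range (w : Int → Int) :
    ∀ (k : Nat) (lo hi : Int) (b : List Int), 0 ≤ lo → lo ≤ hi → hi ≤ (b.length : Int) →
      (hi - lo).toNat = k →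
      (PySem.List.pyRange lo hi 1).foldl (fun b i => PySem.List.pySetD b i (w i)) b
        = b.take lo.toNat ++ (PySem.List.pyRange lo hi 1).map w ++ b.drop hi.toNat := by
  intro k
  induction k with
  | zero =>
    intro lo hi b h0 hlh hhb hk
    have he : lo = hi := by omega
    subst he
    rw [PySem.List.pyRange_one_eq_nil le_rfl]
    simp [List.take_append_drop]
  | succ m ih =>
    intro lo hi b h0 hlh hhb hk
    have hlt : lo < hi := by omega
    rw [PySem.List.pyRange_one_cons hlt]
    simp only [List.foldl_cons, List.map_cons]
    have hset : PySem.List.pySetD b lo (w lo) = b.set lo.toNat (w lo) :=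
      PySem.List.pySetD_of_nonneg b (w lo) h0
    have hlolen : lo.toNat < b.length := by omega
    rw [hset, ih (lo + 1) hi (b.set lo.toNat (w lo)) (by omega) (by omega) (by simp; omega)
      (by omega)]
    have h1 : (lo + 1).toNat = lo.toNat + 1 := by omega
    rw [h1, take_set_aux b lo.toNat (w lo) hlolen,
      drop_set_aux b lo.toNat hi.toNat (w lo) hlolen (by omega)]
    simp

-- A's loop builds the per-index window values.
lemma solution_eq (n : Int) (a : List Int) :
    solution n a = (PySem.List.pyRange 0 n 1).map (winA n a) := by
  unfold solution
  have hfun : (fun (b : List Int) (i : Int) =>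
      if i == 0 then
        PySem.List.pySetD b i (PySem.List.pyGetD a i 0 + PySem.List.pyGetD a (i + 1) 0)
      else if i == n - 1 then
        PySem.List.pySetD b i (PySem.List.pyGetD a (i - 1) 0 + PySem.List.pyGetD a i 0)
      else
        PySem.List.pySetD b i
          (PySem.List.pyGetD a (i - 1) 0 + PySem.List.pyGetD a i 0 + PySem.List.pyGetD a (i + 1) 0))
      = (fun (b : List Int) (i : Int) => PySem.List.pySetD b i (winA n a i)) := by
    funext b i; exact solution_step_eq n a b i
  rcases le_or_gt n 0 with hn | hn
  · rw [PySem.List.pyRange_one_eq_nil hn]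
    show List.replicate n.toNat 0 = List.map (winA n a) []
    rw [show n.toNat = 0 from by omega]
    rfl
  · simp only [hfun]
    rw [foldl_pySetD_range (winA n a) (n - 0).toNat 0 n (List.replicate n.toNat 0)
      le_rfl (by omega) (by simp only [List.length_replicate]; omega) rfl]
    simp

-- B-side: the prefix-sum list built by the fold.
def psums : List Int → Int → List Int
  | [], _ => []
  | x :: t, c => (c + x) :: psums t (c + x)

def fB (s : List Int) (x : Int) : List Int := s ++ [PySem.List.pyGetD s (-1) 0 + x]

lemma fB_prepend (pre s : List Int) (hs : s ≠ []) (x : Int) :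
    fB (pre ++ s) x = pre ++ fB s x := by
  unfold fB
  cases hl : s.getLast? with
  | none => exact absurd (List.getLast?_eq_none_iff.mp hl) hs
  | some y =>
    simp [PySem.List.pyGetD, PySem.List.pyGet?_neg_one, List.getLast?_append, hl]

lemma foldl_fB_prepend (a : List Int) :
    ∀ (pre s : List Int), s ≠ [] → a.foldl fB (pre ++ s) = pre ++ a.foldl fB s := by
  induction a with
  | nil => intro pre s _; simp
  | cons x t ih =>
    intro pre s hs
    simp only [List.foldl_cons]
    rw [fB_prepend pre s hs x]
    exact ih pre (fB s x) (by simp [fB])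

lemma foldl_fB_psums (a : List Int) : ∀ c : Int, a.foldl fB [c] = c :: psums a c := by
  induction a with
  | nil => intro c; rfl
  | cons x t ih =>
    intro c
    simp only [List.foldl_cons]
    have h1 : fB [c] x = [c] ++ [c + x] := by
      simp [fB, PySem.List.pyGetD, PySem.List.pyGet?_neg_one]
    rw [h1, foldl_fB_prepend t [c] [c + x] (by simp), ih (c + x)]
    rfl

lemma psums_getElem? (a : List Int) :
    ∀ (c : Int) (k : Nat), k ≤ a.length →
      (c :: psums a c)[k]? = some (c + (a.take k).sum) := by
  induction a with
  | nil =>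
    intro c k hk
    have : k = 0 := by simpa using hk
    subst this; simp
  | cons x t ih =>
    intro c k hk
    cases k with
    | zero => simp
    | succ j =>
      have hj : j ≤ t.length := by simp at hk; omega
      show ((c + x) :: psums t (c + x))[j]? = some (c + ((x :: t).take (j + 1)).sum)
      rw [ih (c + x) j hj]
      simp [List.take_succ_cons]
      ring

-- S j = sum of the first j elements of a  (value of s[j] in B).
lemma S_val (a : List Int) (j : Int) (h0 : 0 ≤ j) (h1 : j ≤ (a.length : Int)) :
    PySem.List.pyGetD (0 :: psums a 0) j 0 = (a.take j.toNat).sum := by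
  rw [PySem.List.pyGetD_of_nonneg _ _ h0, List.getD_eq_getElem?_getD,
    psums_getElem? a 0 j.toNat (by omega)]
  simp

lemma solution_alt_eq (n : Int) (a : List Int) :
    solution_alt n a = (PySem.List.pyRange 0 n 1).map (fun i =>
      PySem.List.pyGetD (0 :: psums a 0) (min (i + 2) n) 0 -
        PySem.List.pyGetD (0 :: psums a 0) (max (i - 1) 0) 0) := by
  unfold solution_alt
  rw [show (fun (s : List Int) (x : Int) => s ++ [PySem.List.pyGetD s (-1) 0 + x]) = fB from rfl,
    foldl_fB_psums a 0]

-- Pointwise agreement of the window value and the prefix-sum formula.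
lemma win_eq (n : Int) (a : List Int) (h2 : 2 ≤ a.length) (hn : n ≤ (a.length : Int))
    (hD1 : n = 1 → a.getD 1 0 = 0) (k : Nat) (hk : (k : Int) < n) :
    winA n a (k : Int) =
      PySem.List.pyGetD (0 :: psums a 0) (min ((k : Int) + 2) n) 0 -
        PySem.List.pyGetD (0 :: psums a 0) (max ((k : Int) - 1) 0) 0 := by
  rw [S_val a _ (by omega) (by omega), S_val a _ (by omega) (by omega)]
  unfold winA
  by_cases hk0 : k = 0
  · subst hk0
    simp only [Nat.cast_zero, beq_self_eq_true, if_true]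
    rw [PySem.List.pyGetD_eq_getElem a 0 (by omega) (by omega),
        PySem.List.pyGetD_eq_getElem a 0 (by omega) (by omega)]
    by_cases hn1 : n = 1
    · subst hn1
      have hy : a.getD 1 0 = 0 := hD1 rfl
      rw [List.getD_eq_getElem?_getD, List.getElem?_eq_getElem (by omega : 1 < a.length)] at hy
      simp only [Option.getD_some] at hy
      rw [show min ((0 : Int) + 2) 1 = 1 from by omega,
        show max ((0 : Int) - 1) 0 = 0 from by omega]
      rw [show ((1 : Int)).toNat = 0 + 1 from rfl, List.sum_take_succ a 0 (by omega)]
      simp only [show ((0 : Int)).toNat = 0 from rfl, show ((0 : Int) + 1).toNat = 1 from rfl]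
      simp [hy]
    · have hn2 : 2 ≤ n := by omega
      rw [show min ((0 : Int) + 2) n = 2 from by omega,
        show max ((0 : Int) - 1) 0 = 0 from by omega]
      rw [show ((2 : Int)).toNat = 1 + 1 from rfl, List.sum_take_succ a 1 (by omega)]
      have hs1 : (List.take 1 a).sum = (List.take 0 a).sum + a[0]'(by omega) :=
        List.sum_take_succ a 0 (by omega)
      rw [hs1]
      simp only [show ((0 : Int)).toNat = 0 from rfl, show ((0 : Int) + 1).toNat = 1 from rfl]
      simp
  · obtain ⟨j, rfl⟩ : ∃ j, k = j + 1 := ⟨k - 1, by omega⟩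
    have hne0 : (((j + 1 : Nat) : Int) == 0) = false := by
      simp only [beq_eq_false_iff_ne, ne_eq]; omega
    rw [hne0]
    simp only [Bool.false_eq_true, if_false]
    have e1 : (((j + 1 : Nat) : Int) - 1).toNat = j := by omega
    have e2 : (((j + 1 : Nat) : Int)).toNat = j + 1 := by omega
    by_cases hlast : ((j + 1 : Nat) : Int) = n - 1
    · rw [if_pos (by simp only [beq_iff_eq]; exact hlast)]
      rw [show min (((j + 1 : Nat) : Int) + 2) n = n from by omega,
        show max (((j + 1 : Nat) : Int) - 1) 0 = ((j + 1 : Nat) : Int) - 1 from by omega]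
      rw [PySem.List.pyGetD_eq_getElem a 0 (by omega) (by omega),
        PySem.List.pyGetD_eq_getElem a 0 (by omega) (by omega)]
      rw [show n.toNat = (j + 1) + 1 from by omega, List.sum_take_succ a (j + 1) (by omega)]
      have hsj : (List.take (j + 1) a).sum = (List.take j a).sum + a[j]'(by omega) :=
        List.sum_take_succ a j (by omega)
      rw [hsj]
      simp only [e1, e2]
      ring
    · rw [if_neg (by simp only [beq_iff_eq]; exact hlast)]
      have hmid : ((j + 1 : Nat) : Int) + 2 ≤ n := by omega
      rw [show min (((j + 1 : Nat) : Int) + 2) n = ((j + 1 : Nat) : Int) + 2 from by omega,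
        show max (((j + 1 : Nat) : Int) - 1) 0 = ((j + 1 : Nat) : Int) - 1 from by omega]
      rw [PySem.List.pyGetD_eq_getElem a 0 (by omega) (by omega),
        PySem.List.pyGetD_eq_getElem a 0 (by omega) (by omega),
        PySem.List.pyGetD_eq_getElem a 0 (by omega) (by omega)]
      have e3 : (((j + 1 : Nat) : Int) + 1).toNat = (j + 1) + 1 := by omega
      have e4 : (((j + 1 : Nat) : Int) + 2).toNat = ((j + 1) + 1) + 1 := by omega
      rw [e4, List.sum_take_succ a ((j + 1) + 1) (by omega)]
      have hsj1 : (List.take ((j + 1) + 1) a).sum = (List.take (j + 1) a).sum + a[j + 1]'(by omega) :=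
        List.sum_take_succ a (j + 1) (by omega)
      have hsj : (List.take (j + 1) a).sum = (List.take j a).sum + a[j]'(by omega) :=
        List.sum_take_succ a j (by omega)
      rw [hsj1, hsj]
      simp only [e1, e2, e3]
      ring

-- ===== VERDICT (by name: the statement is the Claim_ definition above) =====
theorem solution_spec : Claim_unchanged_solution := by
  intro n a _ hpre hD
  rw [solution_eq, solution_alt_eq]
  rcases hpre with hn0 | ⟨hn1, h2, hlen⟩
  · rw [PySem.List.pyRange_one_eq_nil hn0]; simp
  · apply List.map_congr_left
    intro i hi
    rw [PySem.List.mem_pyRange_one] at hi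
    obtain ⟨hi0, hin⟩ := hi
    have hick : i = ((i.toNat : Nat) : Int) := by omega
    rw [hick]
    exact win_eq n a h2 hlen
      (fun h1 => by
        by_contra hne
        exact hD ⟨h1, hne⟩) i.toNat (by omega)

theorem solution_changed : Claim_changed_solution := by
  unfold Claim_changed_solution; decide

theorem solution_tight : Claim_exact_solution := by
  intro n a _ hpre hD
  obtain ⟨hn1, ha1⟩ := hD
  subst hn1
  rcases hpre with h | ⟨_, h2, _⟩
  · omega
  · rw [solution_eq, solution_alt_eq,
      show PySem.List.pyRange 0 1 1 = [0] from by decide]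
    simp only [List.map_cons, List.map_nil, ne_eq, List.cons.injEq, and_true]
    intro heq
    unfold winA at heq
    simp only [beq_self_eq_true, if_true] at heq
    rw [show min ((0 : Int) + 2) 1 = 1 from by omega,
      show max ((0 : Int) - 1) 0 = 0 from by omega] at heq
    rw [S_val a 1 (by omega) (by omega), S_val a 0 (by omega) (by omega)] at heq
    rw [PySem.List.pyGetD_eq_getElem a 0 (by omega) (by omega),
      PySem.List.pyGetD_eq_getElem a 0 (by omega) (by omega)] at heq
    rw [show ((1 : Int)).toNat = 0 + 1 from rfl, List.sum_take_succ a 0 (by omega)] at heq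
    simp only [show ((0 : Int)).toNat = 0 from rfl,
      show ((0 : Int) + 1).toNat = 1 from rfl] at heq
    have hgd : a[1]'(by omega) = a.getD 1 0 := by
      rw [List.getD_eq_getElem?_getD, List.getElem?_eq_getElem (by omega : 1 < a.length)]
      rfl
    rw [hgd] at heq
    simp at heq
    exact ha1 heq
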